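-- pv_equiv track=rewrite | github.com/jiminkyung/Algorithm | Lv1/숫자 짝꿍.py | solution
-- ===== SOURCE A (Python) =====
-- def solution(X, Y):
--     same = sorted((set(X) & set(Y)), reverse=True)
--     if not same:
--         return "-1"
--     elif same == ["0"]:
--         return "0"
--
--     ret = ""
--     for i in same:
--         x1 = X.count(i)
--         y1 = Y.count(i)
--         m = min(x1, y1)
--         ret += i*m
--     return ret
-- ===== SOURCE B (Python) =====
-- def solution(X, Y):
--     xs = sorted(X, reverse=True)
--     ys = sorted(Y, reverse=True)
--     i = j = 0
--     out = []
--     while i < len(xs) and j < len(ys):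
--         if xs[i] == ys[j]:
--             out.append(xs[i])
--             i += 1
--             j += 1
--         elif xs[i] > ys[j]:
--             i += 1
--         else:
--             j += 1
--     if not out:
--         return "-1"
--     if set(out) == {"0"}:
--         return "0"
--     return "".join(out)
-- ===== Notes on version B (the rewrite author's own statement) =====
-- stated objective: alternative
-- what changed: Replaces A's set-intersection + per-shared-character .count rescans by sorting both strings descending and running a two-pointer merge that emits a character only when the two fronts are equal (yielding the min-count multiset intersection already in descending order), with the -1/0 guards applied to the merged result instead of to the sorted shared set.
import Mathlib
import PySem

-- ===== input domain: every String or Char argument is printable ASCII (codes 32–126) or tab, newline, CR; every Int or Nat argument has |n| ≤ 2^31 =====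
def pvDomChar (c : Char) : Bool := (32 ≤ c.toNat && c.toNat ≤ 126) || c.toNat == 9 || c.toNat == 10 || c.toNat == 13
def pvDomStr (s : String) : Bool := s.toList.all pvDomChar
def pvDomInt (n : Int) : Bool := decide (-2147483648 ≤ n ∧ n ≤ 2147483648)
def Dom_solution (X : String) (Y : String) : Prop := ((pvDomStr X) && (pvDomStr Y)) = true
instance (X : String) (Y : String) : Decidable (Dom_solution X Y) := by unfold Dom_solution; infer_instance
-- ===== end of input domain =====

-- B sorts both strings descending and runs a two-pointer merge that emits a character only when the
-- two fronts are equal, instead of A's sorted set intersection with per-character .count rescans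
-- (alternative algorithm, similar cost on these inputs).

-- ===== PORT A =====
-- Python strings are modelled as their character lists, assembled with String.ofList on return;
-- i*m with m = min of two counts (so m ≥ 0) is List.replicate m i — exact.
def solution (X : String) (Y : String) : String :=
  let same := PySem.List.sorted
    (PySem.Set.inter (PySem.Set.ofList X.toList) (PySem.Set.ofList Y.toList)) (fun c => c) true
  if same = [] then "-1"
  else if same = ['0'] then "0"
  else String.ofList (same.foldl (fun ret i =>
    ret ++ List.replicate (min (PySem.Str.count X (String.ofList [i])) (PySem.Str.count Y (String.ofList [i]))) i) [])

-- ===== PORT B =====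
-- Source B's while loop over the two indices i, j as the structural two-pointer recursion on the two
-- remaining suffixes (out.append in the equal branch becomes the emitted head); exact step for step.
def pvMerge : List Char → List Char → List Char
  | [], _ => []
  | _ :: _, [] => []
  | x :: xs, y :: ys =>
    if x = y then x :: pvMerge xs ys
    else if y < x then pvMerge xs (y :: ys)
    else pvMerge (x :: xs) ys

-- sorted(X, reverse=True) = PySem.List.sorted … true; set(out) == {"0"} = PySem.Set.equal;
-- "".join(out) = String.ofList out.
def solution_alt (X : String) (Y : String) : String :=
  let out := pvMerge (PySem.List.sorted X.toList (fun c => c) true)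
                     (PySem.List.sorted Y.toList (fun c => c) true)
  if out = [] then "-1"
  else if PySem.Set.equal (PySem.Set.ofList out) ['0'] then "0"
  else String.ofList out

-- ===== PRECONDITION & SPEC =====
def Spec_solution (X : String) (Y : String) (out : String) : Prop := out = solution_alt X Y
instance (X : String) (Y : String) (out : String) : Decidable (Spec_solution X Y out) := by unfold Spec_solution; infer_instance

-- ===== CLAIM (what is proved, stated in full; the proofs are below) =====
def Claim_equal_solution : Prop := ∀ (X : String) (Y : String), Dom_solution X Y → Spec_solution X Y (solution X Y)

-- ===== LEMMAS AND PROOFS =====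

-- multiplicity of a character in the shared result: min of its counts in X and Y
def pvM (X Y : String) (c : Char) : Nat := min (X.toList.count c) (Y.toList.count c)

-- str.count with a single-character needle is the character count
theorem pvCount_go_singleton (c : Char) : ∀ (fuel : Nat) (l : List Char) (acc : Nat),
    l.length ≤ fuel → PySem.Chars.count.go [c] fuel l acc = acc + l.count c := by
  intro fuel
  induction fuel with
  | zero =>
    intro l acc h
    cases l with
    | nil => simp [PySem.Chars.count.go]
    | cons x t => simp at h
  | succ n ih =>
    intro l acc h
    cases l with
    | nil => simp [PySem.Chars.count.go]
    | cons x t =>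
      rw [PySem.Chars.count.go]
      by_cases hx : x = c
      · subst hx
        simp only [List.isPrefixOf, beq_self_eq_true, Bool.and_true,
          if_true, List.length_cons, List.length_nil, List.drop_succ_cons, List.drop_zero]
        rw [ih t (acc + 1) (by simp at h; omega)]
        simp
        omega
      · have hpre : [c].isPrefixOf (x :: t) = false := by
          simp [List.isPrefixOf]
          exact fun h' => absurd h'.symm hx
        rw [hpre]
        simp only [Bool.false_eq_true, if_false]
        rw [ih t acc (by simp at h; omega)]
        simp [hx]

theorem pvCount_singleton (s : List Char) (c : Char) : PySem.Chars.count s [c] = s.count c := by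
  simpa using pvCount_go_singleton c s.length s 0 le_rfl

-- a character larger than the head of a descending list is not in it
theorem pvNotMem_of_lt_head (y c : Char) (ys : List Char)
    (hy : (y :: ys).Pairwise (fun a b => b ≤ a)) (h : y < c) : c ∉ y :: ys := by
  intro hc
  rcases List.mem_cons.mp hc with rfl | hc
  · exact absurd h (lt_irrefl _)
  · exact absurd h (not_lt.mpr ((List.pairwise_cons.mp hy).1 c hc))

theorem pvMerge_mem : ∀ (xs ys : List Char) (c : Char), c ∈ pvMerge xs ys → c ∈ xs ∧ c ∈ ys
  | [], ys, c, h => by simp [pvMerge] at h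
  | x :: xs, [], c, h => by simp [pvMerge] at h
  | x :: xs, y :: ys, c, h => by
    rw [pvMerge] at h
    by_cases heq : x = y
    · rw [if_pos heq] at h
      rcases List.mem_cons.mp h with rfl | h
      · subst heq; simp
      · have := pvMerge_mem xs ys c h
        exact ⟨List.mem_cons_of_mem _ this.1, List.mem_cons_of_mem _ this.2⟩
    · rw [if_neg heq] at h
      by_cases hlt : y < x
      · rw [if_pos hlt] at h
        have := pvMerge_mem xs (y :: ys) c h
        exact ⟨List.mem_cons_of_mem _ this.1, this.2⟩
      · rw [if_neg hlt] at h
        have := pvMerge_mem (x :: xs) ys c h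
        exact ⟨this.1, List.mem_cons_of_mem _ this.2⟩
  termination_by xs ys => xs.length + ys.length
  decreasing_by all_goals (simp; try omega)

-- on descending inputs the merge computes the min-count multiset intersection
theorem pvMerge_count : ∀ (xs ys : List Char),
    xs.Pairwise (fun a b => b ≤ a) → ys.Pairwise (fun a b => b ≤ a) → ∀ (c : Char),
    (pvMerge xs ys).count c = min (xs.count c) (ys.count c)
  | [], ys, _, _, c => by simp [pvMerge]
  | x :: xs, [], _, _, c => by simp [pvMerge]
  | x :: xs, y :: ys, hx, hy, c => by
    rw [pvMerge]
    by_cases heq : x = y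
    · subst heq
      rw [if_pos rfl]
      rw [List.count_cons, List.count_cons, List.count_cons,
        pvMerge_count xs ys hx.of_cons hy.of_cons c]
      omega
    · rw [if_neg heq]
      by_cases hlt : y < x
      · rw [if_pos hlt, pvMerge_count xs (y :: ys) hx.of_cons hy c]
        by_cases hcx : c = x
        · subst hcx
          have h0 := List.count_eq_zero_of_not_mem (pvNotMem_of_lt_head y c ys hy hlt)
          have hyc : y ≠ c := fun h => heq h.symm
          simp [hyc] at h0 ⊢
          simp [h0]
        · have hxc : x ≠ c := fun h => hcx h.symm
          simp [List.count_cons, hxc]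
      · have hlt' : x < y := lt_of_le_of_ne (not_lt.mp hlt) heq
        rw [if_neg hlt, pvMerge_count (x :: xs) ys hx hy.of_cons c]
        by_cases hcy : c = y
        · subst hcy
          have h0 := List.count_eq_zero_of_not_mem (pvNotMem_of_lt_head x c xs hx hlt')
          have hxc : x ≠ c := heq
          simp [hxc] at h0 ⊢
          simp [h0]
        · have hyc : y ≠ c := fun h => hcy h.symm
          simp [List.count_cons, hyc]
  termination_by xs ys => xs.length + ys.length
  decreasing_by all_goals (simp; try omega)

theorem pvMerge_sorted : ∀ (xs ys : List Char),
    xs.Pairwise (fun a b => b ≤ a) → ys.Pairwise (fun a b => b ≤ a) →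
    (pvMerge xs ys).Pairwise (fun a b => b ≤ a)
  | [], ys, _, _ => by simp [pvMerge]
  | x :: xs, [], _, _ => by simp [pvMerge]
  | x :: xs, y :: ys, hx, hy => by
    rw [pvMerge]
    by_cases heq : x = y
    · subst heq
      rw [if_pos rfl]
      refine List.pairwise_cons.mpr ⟨?_, pvMerge_sorted xs ys hx.of_cons hy.of_cons⟩
      intro z hz
      exact (List.pairwise_cons.mp hx).1 z (pvMerge_mem xs ys z hz).1
    · rw [if_neg heq]
      by_cases hlt : y < x
      · rw [if_pos hlt]; exact pvMerge_sorted xs (y :: ys) hx.of_cons hy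
      · rw [if_neg hlt]; exact pvMerge_sorted (x :: xs) ys hx hy.of_cons
  termination_by xs ys => xs.length + ys.length
  decreasing_by all_goals (simp; try omega)

theorem pvFlatCount (m : Char → Nat) (l : List Char) (hn : l.Nodup) (c : Char) :
    (l.flatMap (fun a => List.replicate (m a) a)).count c = if c ∈ l then m c else 0 := by
  induction l with
  | nil => simp
  | cons a t ih =>
    simp only [List.flatMap_cons, List.count_append, List.count_replicate]
    rw [ih hn.of_cons]
    by_cases hca : c = a
    · subst hca
      have h := (List.nodup_cons.mp hn).1
      simp [h]
    · simp [hca, Ne.symm hca, List.mem_cons]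

theorem pvFlatSorted (m : Char → Nat) (l : List Char) (hp : l.Pairwise (fun a b => b < a)) :
    (l.flatMap (fun a => List.replicate (m a) a)).Pairwise (fun a b => b ≤ a) := by
  induction l with
  | nil => simp
  | cons a t ih =>
    simp only [List.flatMap_cons]
    apply List.pairwise_append.mpr
    refine ⟨List.pairwise_replicate.mpr (Or.inr le_rfl), ih hp.of_cons, ?_⟩
    intro x hx z hz
    obtain ⟨b, hb, hzb⟩ := List.mem_flatMap.mp hz
    rw [List.eq_of_mem_replicate hx, List.eq_of_mem_replicate hzb]
    exact le_of_lt ((List.pairwise_cons.mp hp).1 b hb)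

-- A's accumulation loop as a flatMap of replicates
theorem pvRetA (X Y : String) (same : List Char) :
    same.foldl (fun ret i =>
      ret ++ List.replicate (min (PySem.Str.count X (String.ofList [i])) (PySem.Str.count Y (String.ofList [i]))) i) []
    = same.flatMap (fun c => List.replicate (pvM X Y c) c) := by
  rw [PySem.List.foldl_append_eq_flatMap]
  simp only [List.nil_append]
  apply List.flatMap_congr
  intro i _
  simp [PySem.Str.count_eq, String.toList_ofList, pvCount_singleton, pvM]

theorem pvM_pos (X Y : String) (c : Char)
    (h : c ∈ PySem.Set.inter (PySem.Set.ofList X.toList) (PySem.Set.ofList Y.toList)) :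
    0 < pvM X Y c := by
  rw [PySem.Set.mem_inter, PySem.Set.mem_ofList, PySem.Set.mem_ofList] at h
  unfold pvM
  have h1 := List.count_pos_iff.mpr h.1
  have h2 := List.count_pos_iff.mpr h.2
  omega

-- central lemma: B's merge equals A's loop result (both the descending min-count intersection)
theorem pvOut_eq (X Y : String) :
    pvMerge (PySem.List.sorted X.toList (fun c => c) true) (PySem.List.sorted Y.toList (fun c => c) true)
    = (PySem.List.sorted (PySem.Set.inter (PySem.Set.ofList X.toList) (PySem.Set.ofList Y.toList)) (fun c => c) true).flatMap
        (fun c => List.replicate (pvM X Y c) c) := by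
  set same := PySem.List.sorted
    (PySem.Set.inter (PySem.Set.ofList X.toList) (PySem.Set.ofList Y.toList)) (fun c => c) true with hsame
  have hnodup : same.Nodup :=
    (PySem.List.sorted_perm _ _ _).symm.nodup
      (PySem.Set.nodup_inter _ _ (PySem.Set.nodup_ofList _))
  have hgt : same.Pairwise (fun a b => b < a) :=
    ((PySem.List.sorted_pairwise_rev _ _).and hnodup).imp
      (fun h => lt_of_le_of_ne h.1 (Ne.symm h.2))
  have hsx := PySem.List.sorted_pairwise_rev X.toList (fun c => c)
  have hsy := PySem.List.sorted_pairwise_rev Y.toList (fun c => c)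
  have hperm : (pvMerge (PySem.List.sorted X.toList (fun c => c) true)
      (PySem.List.sorted Y.toList (fun c => c) true)).Perm
      (same.flatMap (fun c => List.replicate (pvM X Y c) c)) := by
    apply List.perm_iff_count.mpr
    intro c
    rw [pvMerge_count _ _ hsx hsy c,
      (PySem.List.sorted_perm X.toList (fun c => c) true).count_eq c,
      (PySem.List.sorted_perm Y.toList (fun c => c) true).count_eq c,
      pvFlatCount (pvM X Y) same hnodup c]
    by_cases hc : c ∈ same
    · simp [hc, pvM]
    · rw [if_neg hc]
      rw [hsame, PySem.List.mem_sorted, PySem.Set.mem_inter,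
        PySem.Set.mem_ofList, PySem.Set.mem_ofList] at hc
      rcases not_and_or.mp hc with h | h <;>
        simp [List.count_eq_zero_of_not_mem h]
  exact hperm.eq_of_pairwise (fun a b _ _ h1 h2 => le_antisymm h2 h1)
    (pvMerge_sorted _ _ hsx hsy) (pvFlatSorted (pvM X Y) same hgt)

-- ===== VERDICT (by name: the statement is the Claim_ definition above) =====
theorem solution_spec : Claim_equal_solution := by
  intro X Y _
  unfold Spec_solution solution solution_alt
  simp only []
  rw [pvOut_eq X Y, pvRetA X Y]
  set same := PySem.List.sorted
    (PySem.Set.inter (PySem.Set.ofList X.toList) (PySem.Set.ofList Y.toList)) (fun c => c) true with hsame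
  set ret := same.flatMap (fun c => List.replicate (pvM X Y c) c) with hret
  have hmem : ∀ c ∈ same, 0 < pvM X Y c := by
    intro c hc
    rw [hsame, PySem.List.mem_sorted] at hc
    exact pvM_pos X Y c hc
  have hmemret : ∀ c, c ∈ ret ↔ c ∈ same := by
    intro c
    rw [hret, List.mem_flatMap]
    constructor
    · rintro ⟨b, hb, hcb⟩
      rw [(List.mem_replicate.mp hcb).2]; exact hb
    · intro hc
      exact ⟨c, hc, List.mem_replicate.mpr ⟨by have := hmem c hc; omega, rfl⟩⟩
  by_cases h1 : same = []
  · simp [h1, hret]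
  · have hretne : ret ≠ [] := by
      obtain ⟨c, rest, hcons⟩ := List.exists_cons_of_ne_nil h1
      exact List.ne_nil_of_mem ((hmemret c).mpr (hcons ▸ List.mem_cons_self))
    rw [if_neg h1, if_neg hretne]
    have hequal : (PySem.Set.equal (PySem.Set.ofList ret) ['0'] = true) ↔ (∀ x, x ∈ same ↔ x = '0') := by
      rw [PySem.Set.equal_iff]
      constructor
      · intro h x
        have := h x
        simpa [PySem.Set.mem_ofList, hmemret] using this
      · intro h x
        simp [PySem.Set.mem_ofList, hmemret, h]
    by_cases h2 : same = ['0']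
    · rw [if_pos h2, if_pos (hequal.mpr (by simp [h2]))]
    · have hne : ¬ (PySem.Set.equal (PySem.Set.ofList ret) ['0'] = true) := by
        intro he
        have hall := hequal.mp he
        have hnodup : same.Nodup :=
          (PySem.List.sorted_perm _ _ _).symm.nodup
            (PySem.Set.nodup_inter _ _ (PySem.Set.nodup_ofList _))
        obtain ⟨c, rest, hcons⟩ := List.exists_cons_of_ne_nil h1
        have hc0 : c = '0' := (hall c).mp (hcons ▸ List.mem_cons_self)
        cases rest with
        | nil => exact h2 (by rw [hcons, hc0])
        | cons d rest' =>
          have hd0 : d = '0' :=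
            (hall d).mp (hcons ▸ List.mem_cons_of_mem _ List.mem_cons_self)
          rw [hcons, hc0, hd0] at hnodup
          simp at hnodup
      rw [if_neg h2, if_neg hne]
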